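-- pv_equiv track=rewrite | github.com/hashx0x/algorithm | python/summary/ch5/catch_me.py | catch_cony_bfs
-- ===== SOURCE A (Python) =====
-- from collections import deque
-- from collections import deque
--
-- def catch_cony_bfs(cony_start, brown_start):
--     MAX_POS = 200000
--     # 방문 여부를 (위치, 시각)으로 관리하는 딕셔너리(또는 2차원 배열)
--     visited = set()  # 예: (pos, time)을 넣어서 체크
--
--     # 시작 상태
--     queue = deque()
--     queue.append((brown_start, 0))  # (브라운 위치, 시각)
--     visited.add((brown_start, 0))
--
--     # 만약 애초에 브라운==코니 시작이면 0초
--     if cony_start == brown_start: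
--         return 0
--
--     # BFS
--     while queue:
--         brown_pos, t = queue.popleft()
--
--         # 코니 위치(시각 t에)
--         cony_pos = cony_start + t * (t + 1) // 2
--         if cony_pos > MAX_POS:
--             # 코니가 범위를 벗어났다면 잡을 수 없으므로 -1
--             return -1
--
--         # 만약 지금 시점에서 이미 브라운 == 코니?
--         if brown_pos == cony_pos:
--             return t
--
--         # 브라운이 다음 초(t+1)에 갈 수 있는 위치들
--         for next_pos in (brown_pos - 1, brown_pos + 1, brown_pos * 2):
--             if 0 <= next_pos <= MAX_POS:
--                 # 다음 시각 = t+1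
--                 next_time = t + 1
--                 # 그 시각에 코니 위치도 미리 구해 볼 수 있음
--                 # cony_next_pos = cony_start + next_time*(next_time+1)//2
--                 # 하지만 큐에 넣기 전에 일치 여부 확인해도 되고,
--                 # 보통은 큐에서 뺄 때 확인해도 괜찮음.
--
--                 # (next_pos, next_time)이 아직 미방문이면
--                 if (next_pos, next_time) not in visited:
--                     visited.add((next_pos, next_time))
--                     queue.append((next_pos, next_time))
--
--     # 큐가 다 빌 때까지 못 찾으면 -1
--     return -1
-- ===== SOURCE B (Python) =====
-- def catch_cony_bfs(cony_start, brown_start):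
--     MAX_POS = 200000
--     if cony_start == brown_start:
--         return 0
--     frontier = [brown_start]
--     t = 0
--     while frontier:
--         cony_pos = cony_start + t * (t + 1) // 2
--         if cony_pos > MAX_POS:
--             return -1
--         if cony_pos in frontier:
--             return t
--         nxt = []
--         seen = set()
--         for p in frontier:
--             for q in (p - 1, p + 1, p * 2):
--                 if 0 <= q <= MAX_POS and q not in seen:
--                     seen.add(q)
--                     nxt.append(q)
--         frontier = nxt
--         t += 1
--     return -1
-- ===== Notes on version B (the rewrite author's own statement) =====
-- stated objective: simpler
-- what changed: Replaces the (position,time)-keyed deque-and-visited-set BFS with a level-synchronous BFS that keeps only the list of positions reachable at the current second, rebuilt once per second through a per-level seen set, dropping the timestamped queue and global visited set entirely.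
import Mathlib
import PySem

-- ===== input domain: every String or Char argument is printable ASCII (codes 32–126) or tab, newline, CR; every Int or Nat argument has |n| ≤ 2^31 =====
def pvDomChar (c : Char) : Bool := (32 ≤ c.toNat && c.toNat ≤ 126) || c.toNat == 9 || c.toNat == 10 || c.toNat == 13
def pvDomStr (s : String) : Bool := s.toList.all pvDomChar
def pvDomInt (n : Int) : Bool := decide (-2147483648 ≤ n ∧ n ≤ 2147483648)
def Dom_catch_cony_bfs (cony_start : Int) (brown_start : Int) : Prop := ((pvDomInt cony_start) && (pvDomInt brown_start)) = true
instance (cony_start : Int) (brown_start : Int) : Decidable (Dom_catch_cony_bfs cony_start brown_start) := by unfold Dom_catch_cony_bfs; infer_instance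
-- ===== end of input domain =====

-- B replaces A's (position,time)-keyed deque+visited-set BFS by a level-synchronous BFS that keeps
-- only the list of positions reachable at the current second (objective: simpler; same return value).
-- Python's hash sets are kept as Std.HashSet (membership/insert only, never iterated), and Python's
-- O(1) right-append on deque/list is realized purely by consing onto a reversed back/accumulator list
-- that is reversed once per level — same elements popped/kept in the same order.


-- ===== PORT A =====
-- t*(t+1)//2 for the (always nonnegative) time counter; Nat division = Python floordiv here
def pvTri (t : Nat) : Nat := t * (t + 1) / 2

-- the body of A's `for next_pos in (brown_pos-1, brown_pos+1, brown_pos*2)` loop;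
-- st.1 is the deque's back (reversed right end), st.2 the visited set
def pvAStep (t : Nat) (st : List (Int × Nat) × Std.HashSet (Int × Nat)) (np : Int) :
    List (Int × Nat) × Std.HashSet (Int × Nat) :=
  if 0 ≤ np ∧ np ≤ 200000 then
    if (np, t + 1) ∈ st.2 then st
    else ((np, t + 1) :: st.1, st.2.insert (np, t + 1))
  else st

-- A's `while queue:` loop over the two-list deque (front, back); popleft takes the head of front,
-- refilling it from the reversed back when exhausted; the fuel is only a totality guard
-- (proven never to run out on Dom)
def pvALoop (cony : Int) : Nat → List (Int × Nat) → List (Int × Nat) → Std.HashSet (Int × Nat) → Int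
  | f, [], back, V =>
      match back with
      | [] => -1
      | b :: bs => pvALoop cony f ((b :: bs).reverse) [] V
  | 0, _ :: _, _, _ => -1
  | f + 1, (bp, t) :: rest, back, V =>
      let cp : Int := cony + (pvTri t : Int)
      if cp > 200000 then -1
      else if bp = cp then (t : Int)
      else
        let st := [bp - 1, bp + 1, bp * 2].foldl (pvAStep t) (back, V)
        pvALoop cony f rest st.1 st.2
  termination_by f _front back _V => (f, back.length)
  decreasing_by
  · exact Prod.Lex.right _ (by simp)
  · exact Prod.Lex.left _ _ (by omega)

def catch_cony_bfs (cony_start : Int) (brown_start : Int) : Int :=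
  if cony_start = brown_start then 0
  else pvALoop cony_start 429538877683650 [(brown_start, 0)] []
         ((∅ : Std.HashSet (Int × Nat)).insert (brown_start, 0))

-- ===== PORT B =====
-- one candidate q of B's inner loop: keep it if in range and not seen this level;
-- st.1 is the next frontier being built (reversed), st.2 the per-level seen set
def pvBCand (st : List Int × Std.HashSet Int) (q : Int) : List Int × Std.HashSet Int :=
  if 0 ≤ q ∧ q ≤ 200000 then
    if q ∈ st.2 then st
    else (q :: st.1, st.2.insert q)
  else st

-- the three moves of one frontier position p
def pvBStep (st : List Int × Std.HashSet Int) (p : Int) : List Int × Std.HashSet Int :=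
  [p - 1, p + 1, p * 2].foldl pvBCand st

-- B's `while frontier:` loop; terminates because cony's position strictly grows each second
def pvBLoop (cony : Int) (frontier : List Int) (t : Nat) : Int :=
  if frontier = [] then -1
  else
    let cp : Int := cony + (pvTri t : Int)
    if cp > 200000 then -1
    else if cp ∈ frontier then (t : Int)
    else pvBLoop cony ((frontier.foldl pvBStep ([], (∅ : Std.HashSet Int))).1).reverse (t + 1)
  termination_by (200001 - (cony + (pvTri t : Int))).toNat
  decreasing_by
    have h : pvTri (t + 1) = pvTri t + (t + 1) := by
      have h2 : (t + 1) * (t + 2) = t * (t + 1) + (t + 1) * 2 := by ring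
      simp only [pvTri, h2, Nat.add_mul_div_right _ _ (by norm_num : 0 < 2)]
    simp only [h] at *
    push_cast at *
    omega

def catch_cony_bfs_alt (cony_start : Int) (brown_start : Int) : Int :=
  if cony_start = brown_start then 0
  else pvBLoop cony_start [brown_start] 0

-- ===== PRECONDITION & SPEC =====
def Spec_catch_cony_bfs (cony_start : Int) (brown_start : Int) (out : Int) : Prop := out = catch_cony_bfs_alt cony_start brown_start
instance (cony_start : Int) (brown_start : Int) (out : Int) : Decidable (Spec_catch_cony_bfs cony_start brown_start out) := by unfold Spec_catch_cony_bfs; infer_instance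

-- ===== CLAIM (what is proved, stated in full; the proofs are below) =====
def Claim_equal_catch_cony_bfs : Prop := ∀ (cony_start : Int) (brown_start : Int), Dom_catch_cony_bfs cony_start brown_start → Spec_catch_cony_bfs cony_start brown_start (catch_cony_bfs cony_start brown_start)

-- ===== LEMMAS AND PROOFS =====

-- equation lemmas for the two-list deque loop
theorem pvALoop_nil (cony : Int) (f : Nat) (V : Std.HashSet (Int × Nat)) :
    pvALoop cony f [] [] V = -1 := by
  rw [pvALoop]

theorem pvALoop_flip (cony : Int) (f : Nat) (back : List (Int × Nat))
    (V : Std.HashSet (Int × Nat)) (hb : back ≠ []) :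
    pvALoop cony f [] back V = pvALoop cony f back.reverse [] V := by
  match back with
  | [] => exact absurd rfl hb
  | b :: bs => rw [pvALoop]

theorem pvALoop_pop (cony : Int) (f : Nat) (bp : Int) (t : Nat)
    (rest back : List (Int × Nat)) (V : Std.HashSet (Int × Nat)) :
    pvALoop cony (f + 1) ((bp, t) :: rest) back V =
      (let cp : Int := cony + (pvTri t : Int)
       if cp > 200000 then -1
       else if bp = cp then (t : Int)
       else
         let st := [bp - 1, bp + 1, bp * 2].foldl (pvAStep t) (back, V)
         pvALoop cony f rest st.1 st.2) := by
  rw [pvALoop]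

-- one candidate: A's guarded enqueue and B's guarded keep cons the same (possibly empty) block
theorem pvStep1 (t : Nat) (V : Std.HashSet (Int × Nat)) (back : List (Int × Nat))
    (nxt : List Int) (seen : Std.HashSet Int) (q : Int)
    (hR : ∀ x : Int, (x, t + 1) ∈ V ↔ x ∈ seen) :
    ∃ (d : List Int) (seen' : Std.HashSet Int) (V' : Std.HashSet (Int × Nat)),
      pvBCand (nxt, seen) q = (d ++ nxt, seen') ∧
      pvAStep t (back, V) q = (d.map (fun x => (x, t + 1)) ++ back, V') ∧
      (∀ x : Int, (x, t + 1) ∈ V' ↔ x ∈ seen') ∧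
      (∀ x, x ∈ V' → x ∈ V ∨ x.2 = t + 1) := by
  by_cases hr : 0 ≤ q ∧ q ≤ 200000
  · by_cases hm : q ∈ seen
    · have hv : (q, t + 1) ∈ V := (hR q).2 hm
      exact ⟨[], seen, V, by simp [pvBCand, hr, hm], by simp [pvAStep, hr, hv], hR,
        fun x hx => Or.inl hx⟩
    · have hv : (q, t + 1) ∉ V := fun h => hm ((hR q).1 h)
      refine ⟨[q], seen.insert q, V.insert (q, t + 1),
        by simp [pvBCand, hr, hm], by simp [pvAStep, hr, hv], ?_, ?_⟩
      · intro x
        simp only [Std.HashSet.mem_insert, beq_iff_eq, Prod.mk.injEq, and_true]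
        rw [hR x]
      · intro x hx
        rcases Std.HashSet.mem_insert.1 hx with h | h
        · have hx2 : (q, t + 1) = x := by simpa using h
          right
          simp [← hx2]
        · exact Or.inl h
  · exact ⟨[], seen, V, by simp [pvBCand, hr], by simp [pvAStep, hr], hR,
      fun x hx => Or.inl hx⟩

-- a whole candidate list (in particular the three moves of one popped position)
theorem pvStepList (t : Nat) (qs : List Int) :
    ∀ (V : Std.HashSet (Int × Nat)) (back : List (Int × Nat))
      (nxt : List Int) (seen : Std.HashSet Int),
    (∀ x : Int, (x, t + 1) ∈ V ↔ x ∈ seen) →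
    ∃ (d : List Int) (seen' : Std.HashSet Int) (V' : Std.HashSet (Int × Nat)),
      qs.foldl pvBCand (nxt, seen) = (d ++ nxt, seen') ∧
      qs.foldl (pvAStep t) (back, V) = (d.map (fun x => (x, t + 1)) ++ back, V') ∧
      (∀ x : Int, (x, t + 1) ∈ V' ↔ x ∈ seen') ∧
      (∀ x, x ∈ V' → x ∈ V ∨ x.2 = t + 1) := by
  induction qs with
  | nil =>
    intro V back nxt seen hR
    exact ⟨[], seen, V, by simp, by simp, hR, fun x hx => Or.inl hx⟩
  | cons q qs ih =>
    intro V back nxt seen hR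
    obtain ⟨d1, seen1, V1, hb1, ha1, hR1, hm1⟩ := pvStep1 t V back nxt seen q hR
    obtain ⟨d2, seen2, V2, hb2, ha2, hR2, hm2⟩ :=
      ih V1 (d1.map (fun x => (x, t + 1)) ++ back) (d1 ++ nxt) seen1 hR1
    refine ⟨d2 ++ d1, seen2, V2, ?_, ?_, hR2, ?_⟩
    · simp only [List.foldl_cons, hb1, hb2, List.append_assoc]
    · simp only [List.foldl_cons, ha1, ha2, List.map_append, List.append_assoc]
    · intro x hx
      rcases hm2 x hx with h | h
      · exact hm1 x h
      · exact Or.inr h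

-- if cony's position is in the current level, A returns the level's time
theorem pvLevelCatch (cony : Int) (t : Nat) (rem : List Int) :
    ∀ (back : List (Int × Nat)) (V : Std.HashSet (Int × Nat)) (f : Nat),
    cony + (pvTri t : Int) ≤ 200000 → (cony + (pvTri t : Int)) ∈ rem →
    pvALoop cony (f + rem.length) (rem.map (fun p => (p, t))) back V = (t : Int) := by
  induction rem with
  | nil => simp
  | cons p rem ih =>
    intro back V f hle hmem
    have hfs : f + (p :: rem).length = (f + rem.length) + 1 := by simp; omega
    rw [hfs]
    simp only [List.map_cons]
    rw [pvALoop_pop]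
    have hnot : ¬ (cony + (pvTri t : Int) > 200000) := by omega
    by_cases hp : p = cony + (pvTri t : Int)
    · simp [hnot, hp]
    · have hmem' : (cony + (pvTri t : Int)) ∈ rem := by
        rcases List.mem_cons.1 hmem with h | h
        · exact absurd h.symm hp
        · exact h
      simp only [hnot, if_false, hp, if_false]
      exact ih _ _ f hle hmem'

-- processing one whole level of A's queue equals one frontier rebuild of B
theorem pvLevelRun (cony : Int) (t : Nat) (rem : List Int) :
    ∀ (accRev : List Int) (V : Std.HashSet (Int × Nat)) (seen : Std.HashSet Int) (f : Nat),
    (∀ x : Int, (x, t + 1) ∈ V ↔ x ∈ seen) → (∀ x ∈ V, x.2 ≤ t + 1) →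
    cony + (pvTri t : Int) ≤ 200000 → (∀ p ∈ rem, p ≠ cony + (pvTri t : Int)) →
    ∃ V' : Std.HashSet (Int × Nat),
      pvALoop cony (f + rem.length) (rem.map (fun p => (p, t))) (accRev.map (fun p => (p, t + 1))) V
        = pvALoop cony f [] ((rem.foldl pvBStep (accRev, seen)).1.map (fun p => (p, t + 1))) V' ∧
      (∀ x ∈ V', x.2 ≤ t + 1) := by
  induction rem with
  | nil =>
    intro accRev V seen f _ hT _ _
    refine ⟨V, ?_, hT⟩
    simp
  | cons p rem ih =>
    intro accRev V seen f hR hT hle hno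
    have hfs : f + (p :: rem).length = (f + rem.length) + 1 := by simp; omega
    rw [hfs]
    simp only [List.map_cons]
    rw [pvALoop_pop]
    have hnot : ¬ (cony + (pvTri t : Int) > 200000) := by omega
    have hp : ¬ (p = cony + (pvTri t : Int)) := hno p (by simp)
    obtain ⟨d, seen1, V1, hb, ha, hR1, hm1⟩ := pvStepList t [p - 1, p + 1, p * 2] V
      (accRev.map (fun p => (p, t + 1))) accRev seen hR
    have hT1 : ∀ x ∈ V1, x.2 ≤ t + 1 := by
      intro x hx
      rcases hm1 x hx with h | h
      · exact hT x h
      · omega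
    obtain ⟨V', h1, h2⟩ := ih (d ++ accRev) V1 seen1 f hR1 hT1 hle
      (fun q hq => hno q (by simp [hq]))
    refine ⟨V', ?_, h2⟩
    simp only [hnot, if_false, hp, if_false, ha, ← List.map_append]
    rw [h1]
    simp only [List.foldl_cons, pvBStep, hb]

-- B's frontier rebuild yields distinct, in-range positions (the seen set mirrors the kept list)
theorem pvBCandInv (qs : List Int) :
    ∀ (nxt : List Int) (seen : Std.HashSet Int),
    (∀ x : Int, x ∈ seen ↔ x ∈ nxt) → nxt.Nodup →
    (∀ x : Int, x ∈ (qs.foldl pvBCand (nxt, seen)).2 ↔ x ∈ (qs.foldl pvBCand (nxt, seen)).1) ∧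
    (qs.foldl pvBCand (nxt, seen)).1.Nodup ∧
    (∀ x ∈ (qs.foldl pvBCand (nxt, seen)).1, x ∈ nxt ∨ (0 ≤ x ∧ x ≤ 200000)) := by
  induction qs with
  | nil => exact fun nxt seen hS hN => ⟨hS, hN, fun x hx => Or.inl hx⟩
  | cons q qs ih =>
    intro nxt seen hS hN
    simp only [List.foldl_cons]
    by_cases hr : 0 ≤ q ∧ q ≤ 200000
    · by_cases hm : q ∈ seen
      · have hstep : pvBCand (nxt, seen) q = (nxt, seen) := by simp [pvBCand, hr, hm]
        rw [hstep]
        exact ih nxt seen hS hN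
      · have hstep : pvBCand (nxt, seen) q = (q :: nxt, seen.insert q) := by
          simp [pvBCand, hr, hm]
        rw [hstep]
        have hS' : ∀ x : Int, x ∈ seen.insert q ↔ x ∈ q :: nxt := by
          intro x
          simp only [Std.HashSet.mem_insert, beq_iff_eq, List.mem_cons, hS x]
          tauto
        have hN' : (q :: nxt).Nodup := by
          have hq : q ∉ nxt := fun h => hm ((hS q).2 h)
          simp [hN, hq]
        obtain ⟨i1, i2, i3⟩ := ih (q :: nxt) (seen.insert q) hS' hN'
        refine ⟨i1, i2, fun x hx => ?_⟩
        rcases i3 x hx with h | h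
        · rcases List.mem_cons.1 h with h2 | h2
          · exact Or.inr (h2 ▸ hr)
          · exact Or.inl h2
        · exact Or.inr h
    · have hstep : pvBCand (nxt, seen) q = (nxt, seen) := by simp [pvBCand, hr]
      rw [hstep]
      exact ih nxt seen hS hN

theorem pvNextNodupRange (L : List Int) :
    ∀ (nxt : List Int) (seen : Std.HashSet Int),
    (∀ x : Int, x ∈ seen ↔ x ∈ nxt) → nxt.Nodup →
    (∀ x : Int, x ∈ (L.foldl pvBStep (nxt, seen)).2 ↔ x ∈ (L.foldl pvBStep (nxt, seen)).1) ∧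
    (L.foldl pvBStep (nxt, seen)).1.Nodup ∧
    (∀ x ∈ (L.foldl pvBStep (nxt, seen)).1, x ∈ nxt ∨ (0 ≤ x ∧ x ≤ 200000)) := by
  induction L with
  | nil => exact fun nxt seen hS hN => ⟨hS, hN, fun x hx => Or.inl hx⟩
  | cons p L ih =>
    intro nxt seen hS hN
    simp only [List.foldl_cons]
    obtain ⟨j1, j2, j3⟩ := pvBCandInv [p - 1, p + 1, p * 2] nxt seen hS hN
    have hsurj : pvBStep (nxt, seen) p
        = (([p - 1, p + 1, p * 2].foldl pvBCand (nxt, seen)).1,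
           ([p - 1, p + 1, p * 2].foldl pvBCand (nxt, seen)).2) := by
      simp [pvBStep]
    rw [hsurj]
    obtain ⟨i1, i2, i3⟩ := ih _ _ j1 j2
    refine ⟨i1, i2, fun x hx => ?_⟩
    rcases i3 x hx with h | h
    · rcases j3 x h with h2 | h2
      · exact Or.inl h2
      · exact Or.inr h2
    · exact Or.inr h

-- a duplicate-free list of in-range positions has at most 200001 elements
theorem pvLenBound (L : List Int) (hn : L.Nodup) (hr : ∀ x ∈ L, 0 ≤ x ∧ x ≤ 200000) :
    L.length ≤ 200001 := by
  have h1 : L.toFinset.card = L.length := List.toFinset_card_of_nodup hn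
  have h2 : L.toFinset ⊆ Finset.Icc (0 : ℤ) 200000 := by
    intro x hx
    have := hr x (List.mem_toFinset.1 hx)
    exact Finset.mem_Icc.2 this
  have h3 := Finset.card_le_card h2
  rw [h1] at h3
  simpa using h3

theorem pvTriSucc (t : Nat) : pvTri (t + 1) = pvTri t + (t + 1) := by
  have h2 : (t + 1) * (t + 2) = t * (t + 1) + (t + 1) * 2 := by ring
  simp only [pvTri, h2, Nat.add_mul_div_right _ _ (by norm_num : 0 < 2)]

-- the main simulation: a level-aligned A state runs like B from time t on
theorem pvOuter (cony : Int) (n : Nat) :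
    ∀ (t : Nat) (L : List Int) (V : Std.HashSet (Int × Nat)) (f : Nat),
    (200001 - (cony + (pvTri t : Int))).toNat ≤ n →
    (∀ x ∈ V, x.2 ≤ t) → L.length ≤ 200001 →
    ((200001 - (cony + (pvTri t : Int))).toNat + 1) * 200001 ≤ f →
    pvALoop cony f (L.map (fun p => (p, t))) [] V = pvBLoop cony L t := by
  induction n with
  | zero =>
    intro t L V f hn hT hL hf
    rw [pvBLoop]
    cases L with
    | nil => simp [pvALoop_nil]
    | cons p L' =>
      have hcp : cony + (pvTri t : Int) > 200000 := by omega
      obtain ⟨f', rfl⟩ : ∃ f', f = f' + 1 := ⟨f - 1, by omega⟩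
      rw [List.map_cons, pvALoop_pop]
      simp [hcp]
  | succ n ih =>
    intro t L V f hn hT hL hf
    rw [pvBLoop]
    cases hLc : L with
    | nil => simp [pvALoop_nil]
    | cons p L' =>
      subst hLc
      by_cases hcp : cony + (pvTri t : Int) > 200000
      · obtain ⟨f', rfl⟩ : ∃ f', f = f' + 1 := ⟨f - 1, by
          have h2 : 200001 ≤ f := le_trans (Nat.le_mul_of_pos_left 200001 (Nat.succ_pos _)) hf
          omega⟩
        rw [List.map_cons, pvALoop_pop]
        simp [hcp]
      · have hle : cony + (pvTri t : Int) ≤ 200000 := by omega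
        by_cases hmem : (cony + (pvTri t : Int)) ∈ (p :: L')
        · -- caught at this level
          obtain ⟨f', rfl⟩ : ∃ f', f = f' + (p :: L').length := ⟨f - (p :: L').length, by
            have h2 : 200001 ≤ f := le_trans (Nat.le_mul_of_pos_left 200001 (Nat.succ_pos _)) hf
            have h1 : (p :: L').length ≤ 200001 := hL
            omega⟩
          rw [pvLevelCatch cony t (p :: L') [] V f' hle hmem]
          simp only [if_neg (by simp : ¬(p :: L') = ([] : List Int)), if_neg hcp, if_pos hmem]
        · -- not caught: run the level, flip the deque, recurse
          have hRinit : ∀ x : Int, (x, t + 1) ∈ V ↔ x ∈ (∅ : Std.HashSet Int) := by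
            intro x
            constructor
            · intro h
              have h2 : t + 1 ≤ t := by simpa using hT _ h
              omega
            · intro h
              exact absurd h (Std.HashSet.not_mem_empty)
          have hTinit : ∀ x ∈ V, x.2 ≤ t + 1 := fun x hx => Nat.le_succ_of_le (hT x hx)
          have hno : ∀ q ∈ (p :: L'), q ≠ cony + (pvTri t : Int) := by
            intro q hq h
            exact hmem (h ▸ hq)
          obtain ⟨f', rfl⟩ : ∃ f', f = f' + (p :: L').length := ⟨f - (p :: L').length, by
            have h2 : 200001 ≤ f := le_trans (Nat.le_mul_of_pos_left 200001 (Nat.succ_pos _)) hf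
            have h1 : (p :: L').length ≤ 200001 := hL
            omega⟩
          obtain ⟨V', hrun, hT'⟩ := pvLevelRun cony t (p :: L') [] V (∅ : Std.HashSet Int) f'
            hRinit hTinit hle hno
          simp only [List.map_nil] at hrun
          rw [hrun]
          simp only [if_neg (by simp : ¬(p :: L') = ([] : List Int)), if_neg hcp, if_neg hmem]
          -- next level facts
          have hnext := pvNextNodupRange (p :: L') [] (∅ : Std.HashSet Int)
            (fun x => by simp [Std.HashSet.not_mem_empty]) (by simp)
          have hnr : ∀ x ∈ ((p :: L').foldl pvBStep ([], (∅ : Std.HashSet Int))).1,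
              0 ≤ x ∧ x ≤ 200000 := by
            intro x hx
            rcases hnext.2.2 x hx with h | h
            · simp at h
            · exact h
          have hlen' : (((p :: L').foldl pvBStep ([], (∅ : Std.HashSet Int))).1.reverse).length ≤ 200001 := by
            rw [List.length_reverse]
            exact pvLenBound _ hnext.2.1 hnr
          have hμ : (200001 - (cony + (pvTri (t + 1) : Int))).toNat + 1
              ≤ (200001 - (cony + (pvTri t : Int))).toNat := by
            have := pvTriSucc t
            push_cast [this]
            omega
          have hn' : (200001 - (cony + (pvTri (t + 1) : Int))).toNat ≤ n :=
            Nat.lt_succ_iff.mp (lt_of_lt_of_le (Nat.lt_of_succ_le hμ) hn)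
          have hf' : ((200001 - (cony + (pvTri (t + 1) : Int))).toNat + 1) * 200001 ≤ f' := by
            have h1 : ((200001 - (cony + (pvTri (t + 1) : Int))).toNat + 1) * 200001
                ≤ (200001 - (cony + (pvTri t : Int))).toNat * 200001 :=
              Nat.mul_le_mul_right 200001 hμ
            have h2 : (200001 - (cony + (pvTri t : Int))).toNat * 200001 + 200001 ≤ f' + 200001 :=
              le_trans (by rw [← Nat.succ_mul]; exact hf) (Nat.add_le_add_left hL f')
            exact le_trans h1 (Nat.le_of_add_le_add_right h2)
          have hstep := ih (t + 1) (((p :: L').foldl pvBStep ([], (∅ : Std.HashSet Int))).1.reverse)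
            V' f' hn' hT' hlen' hf'
          -- flip the finished back of the deque into the next level's front
          cases hF : ((p :: L').foldl pvBStep ([], (∅ : Std.HashSet Int))).1 with
          | nil =>
            rw [hF] at hstep
            simp only [List.reverse_nil, List.map_nil, pvALoop_nil] at hstep
            simp only [List.map_nil, List.reverse_nil, pvALoop_nil]
            exact hstep
          | cons b bs =>
            rw [hF] at hstep
            rw [pvALoop_flip cony f' _ V' (by simp)]
            rw [← List.map_reverse]
            exact hstep

-- ===== VERDICT (by name: the statement is the Claim_ definition above) =====
theorem catch_cony_bfs_spec : Claim_equal_catch_cony_bfs := by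
  intro cony brown hdom
  unfold Spec_catch_cony_bfs catch_cony_bfs catch_cony_bfs_alt
  by_cases heq : cony = brown
  · simp [heq]
  · simp only [heq, if_false]
    have hdom' : -2147483648 ≤ cony := by
      unfold Dom_catch_cony_bfs pvDomInt at hdom
      simp at hdom
      exact hdom.1.1
    have hmap : ([brown].map (fun p => (p, (0 : Nat)))) = [(brown, (0 : Nat))] := by simp
    rw [← hmap]
    apply pvOuter cony ((200001 - (cony + (pvTri 0 : Int))).toNat) 0 [brown]
    · exact Nat.le_refl _
    · intro x hx
      rcases Std.HashSet.mem_insert.1 hx with h | h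
      · have hx2 : (brown, (0 : Nat)) = x := by simpa using h
        simp [← hx2]
      · exact absurd h (Std.HashSet.not_mem_empty)
    · simp
    · have hμ0 : (200001 - (cony + (pvTri 0 : Int))).toNat ≤ 2147683649 := by
        simp [pvTri]
        omega
      calc ((200001 - (cony + (pvTri 0 : Int))).toNat + 1) * 200001
          ≤ (2147683649 + 1) * 200001 := Nat.mul_le_mul_right _ (by omega)
        _ ≤ 429538877683650 := by norm_num
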